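-- pv_equiv track=rewrite | github.com/shashank-123041/PySam | Day7/boy_girl1.py | arrangeStudents
-- ===== SOURCE A (Python) =====
-- def arrangeStudents(a, b):
--
--     def is_valid(l):
--         for i in range(1, len(l)):
--             if (l[i] in a and l[i-1] in a) or (l[i] in b and l[i-1] in b):
--                 if (l[i] in a and l[i-1] in b) or (l[i] in b and l[i-1] in a) :
--                     return True
--                 return False
--         return True
--
--     arrangement=sorted(a+b)
--     return is_valid(arrangement)
-- ===== SOURCE B (Python) =====
-- def arrangeStudents(a, b):
--     # Walk the DISTINCT values in sorted order with their multiplicities, instead of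
--     # scanning every adjacent pair of the sorted multiset: a duplicated value is itself
--     # an adjacent same-group pair, and between distinct consecutive values only one
--     # representative pair matters.
--     sa, sb = set(a), set(b)
--     counts = {}
--     for x in a:
--         counts[x] = counts.get(x, 0) + 1
--     for x in b:
--         counts[x] = counts.get(x, 0) + 1
--     prev = None
--     for v in sorted(counts):
--         if prev is not None:
--             if (prev in sa and v in sa) or (prev in sb and v in sb):
--                 return (v in sa and prev in sb) or (v in sb and prev in sa)
--         if counts[v] >= 2:
--             return v in sa and v in sb
--         prev = v
--     return True
-- ===== Notes on version B (the rewrite author's own statement) =====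
-- stated objective: alternative
-- what changed: B builds a value->multiplicity counter and walks only the DISTINCT values in sorted order (a duplicated value is itself an adjacent same-group pair; between distinct consecutive values one representative pair decides), instead of A's index loop over every adjacent pair of the full sorted multiset with repeated O(n) list-membership tests.
import Mathlib
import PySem

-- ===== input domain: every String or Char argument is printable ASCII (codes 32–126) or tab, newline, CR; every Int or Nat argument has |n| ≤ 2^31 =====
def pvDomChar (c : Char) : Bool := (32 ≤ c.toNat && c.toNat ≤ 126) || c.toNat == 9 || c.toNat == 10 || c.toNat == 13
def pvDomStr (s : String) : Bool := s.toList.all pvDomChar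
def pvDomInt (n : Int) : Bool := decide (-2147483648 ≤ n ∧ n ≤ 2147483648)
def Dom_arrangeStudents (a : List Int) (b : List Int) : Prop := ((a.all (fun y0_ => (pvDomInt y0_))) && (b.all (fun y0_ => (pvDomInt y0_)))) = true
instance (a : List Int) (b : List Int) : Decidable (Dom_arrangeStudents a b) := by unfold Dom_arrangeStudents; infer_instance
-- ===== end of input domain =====

-- B walks the DISTINCT sorted values with their multiplicities (a counter dict) instead of
-- scanning every adjacent pair of the full sorted multiset (objective: alternative).

-- ===== PORT A =====
-- A's inner `for i in range(1, len(l))` loop with early returns, as index recursion.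
def isValidGo (a b l : List Int) (i : Nat) : Bool :=
  if i < l.length then
    let x := l.getD i 0        -- l[i], always in range here
    let p := l.getD (i - 1) 0  -- l[i-1], i ≥ 1
    if (a.contains x && a.contains p) || (b.contains x && b.contains p) then
      if (a.contains x && b.contains p) || (b.contains x && a.contains p) then true
      else false
    else isValidGo a b l (i + 1)
  else true
termination_by l.length - i

def arrangeStudents (a : List Int) (b : List Int) : Bool :=
  let arrangement := PySem.List.sorted (a ++ b) (fun x => x) false
  isValidGo a b arrangement 1

-- ===== PORT B =====
-- B's `for v in sorted(counts)` loop with its `prev` variable, as recursion over the value list.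
def bScan (sa sb : PySem.Set Int) (counts : PySem.Dict Int Int) : Option Int → List Int → Bool
  | prev, v :: rest =>
    match prev with
    | some p =>
      if (PySem.Set.contains sa p && PySem.Set.contains sa v) ||
         (PySem.Set.contains sb p && PySem.Set.contains sb v) then
        (PySem.Set.contains sa v && PySem.Set.contains sb p) ||
        (PySem.Set.contains sb v && PySem.Set.contains sa p)
      else if 2 ≤ counts.getD v 0 then PySem.Set.contains sa v && PySem.Set.contains sb v
      else bScan sa sb counts (some v) rest
    | none =>
      if 2 ≤ counts.getD v 0 then PySem.Set.contains sa v && PySem.Set.contains sb v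
      else bScan sa sb counts (some v) rest
  | _, [] => true

def arrangeStudents_alt (a : List Int) (b : List Int) : Bool :=
  let sa := PySem.Set.ofList a
  let sb := PySem.Set.ofList b
  let counts := b.foldl (fun d x => d.insert x (d.getD x 0 + 1))
                  (a.foldl (fun d x => d.insert x (d.getD x 0 + 1)) (PySem.Dict.empty : PySem.Dict Int Int))
  bScan sa sb counts none (PySem.List.sorted counts.keys (fun x => x) false)

-- ===== PRECONDITION & SPEC =====
def Spec_arrangeStudents (a : List Int) (b : List Int) (out : Bool) : Prop := out = arrangeStudents_alt a b
instance (a : List Int) (b : List Int) (out : Bool) : Decidable (Spec_arrangeStudents a b out) := by unfold Spec_arrangeStudents; infer_instance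

-- ===== CLAIM (what is proved, stated in full; the proofs are below) =====
def Claim_equal_arrangeStudents : Prop := ∀ (a : List Int) (b : List Int), Dom_arrangeStudents a b → Spec_arrangeStudents a b (arrangeStudents a b)

-- ===== LEMMAS AND PROOFS =====

-- A's scan re-expressed structurally on the list of adjacent pairs.
def pairScan (a b : List Int) : List Int → Bool
  | p :: x :: rest =>
    if (a.contains x && a.contains p) || (b.contains x && b.contains p) then
      if (a.contains x && b.contains p) || (b.contains x && a.contains p) then true
      else false
    else pairScan a b (x :: rest)
  | _ => true

theorem pairScan_short (a b : List Int) (l : List Int) (h : l.length ≤ 1) :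
    pairScan a b l = true := by
  match l, h with
  | [], _ => rfl
  | [x], _ => rfl

theorem isValidGo_eq_pairScan (a b l : List Int) (i : Nat) :
    isValidGo a b l (i + 1) = pairScan a b (l.drop i) := by
  by_cases h : i + 1 < l.length
  · have hi : i < l.length := by omega
    have hd : l.drop i = l[i] :: l[i+1] :: l.drop (i + 2) := by
      rw [List.drop_eq_getElem_cons hi, List.drop_eq_getElem_cons h]
    have hx : l.getD (i + 1) 0 = l[i+1] := List.getD_eq_getElem l 0 h
    have hp : l.getD (i + 1 - 1) 0 = l[i] := by
      simp only [Nat.add_sub_cancel]; exact List.getD_eq_getElem l 0 hi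
    rw [isValidGo, if_pos h]
    simp only [hx, hp, hd, pairScan]
    split_ifs with h1 h2
    · rfl
    · rfl
    · have := isValidGo_eq_pairScan a b l (i + 1)
      rw [this, List.drop_eq_getElem_cons h]
  · rw [isValidGo, if_neg h]
    have : (l.drop i).length ≤ 1 := by simp [List.length_drop]; omega
    exact (pairScan_short a b _ this).symm
termination_by l.length - i

theorem set_contains_eq (a : List Int) (x : Int) :
    PySem.Set.contains (PySem.Set.ofList a) x = a.contains x := by
  by_cases h : x ∈ a
  · rw [(PySem.Set.contains_iff _ _).2 ((PySem.Set.mem_ofList _ _).2 h)]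
    simp [h]
  · have h1 : ¬ PySem.Set.contains (PySem.Set.ofList a) x = true := fun hc =>
      h ((PySem.Set.mem_ofList _ _).1 ((PySem.Set.contains_iff _ _).1 hc))
    simp only [Bool.not_eq_true] at h1
    rw [h1]; simp [h]

-- the sorted multiset seen as blocks of equal values over the distinct value list
def blocks (c : Int → Nat) (vals : List Int) : List Int :=
  vals.flatMap (fun v => List.replicate (c v) v)

theorem blocks_cons (c : Int → Nat) (v : Int) (vs : List Int) :
    blocks c (v :: vs) = List.replicate (c v) v ++ blocks c vs := by
  simp [blocks]

theorem count_blocks (c : Int → Nat) (vals : List Int) (hnd : vals.Nodup) (x : Int) :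
    (blocks c vals).count x = if x ∈ vals then c x else 0 := by
  induction vals with
  | nil => simp [blocks]
  | cons v vs ih =>
    simp only [List.nodup_cons] at hnd
    simp only [blocks, List.flatMap_cons, List.count_append, List.count_replicate,
      List.mem_cons]
    rw [show (List.flatMap (fun v => List.replicate (c v) v) vs) = blocks c vs from rfl,
      ih hnd.2]
    by_cases hx : x = v
    · subst hx; simp [hnd.1]
    · simp [hx, Ne.symm hx]

theorem blocks_perm (a b : List Int) (vals : List Int) (hnd : vals.Nodup)
    (hmem : ∀ v, v ∈ vals ↔ v ∈ a ++ b) :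
    (blocks (fun v => (a ++ b).count v) vals).Perm (a ++ b) := by
  rw [List.perm_iff_count]
  intro x
  rw [count_blocks _ _ hnd]
  by_cases hx : x ∈ vals
  · simp [hx]
  · have : x ∉ a ++ b := fun h => hx ((hmem x).2 h)
    simp [hx, List.count_eq_zero.2 this]

theorem mem_blocks (c : Int → Nat) (vals : List Int) (y : Int) (h : y ∈ blocks c vals) :
    y ∈ vals := by
  simp only [blocks, List.mem_flatMap, List.mem_replicate] at h
  obtain ⟨v, hv, _, rfl⟩ := h
  exact hv

theorem blocks_pairwise (c : Int → Nat) (vals : List Int)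
    (hp : vals.Pairwise (· ≤ ·)) :
    (blocks c vals).Pairwise (· ≤ ·) := by
  induction vals with
  | nil => simp [blocks]
  | cons v vs ih =>
    rw [List.pairwise_cons] at hp
    simp only [blocks, List.flatMap_cons]
    rw [List.pairwise_append]
    refine ⟨List.pairwise_replicate.2 (Or.inr le_rfl), ih hp.2, ?_⟩
    intro x hx y hy
    rw [List.mem_replicate] at hx
    exact hx.2 ▸ hp.1 _ (mem_blocks _ _ _ hy)

-- core: A's pair scan over the blocks equals B's distinct-value scan
theorem pairScan_blocks (a b : List Int) (counts : PySem.Dict Int Int) (vals : List Int)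
    (hmem : ∀ v ∈ vals, v ∈ a ++ b)
    (hcnt : ∀ v ∈ vals, counts.getD v 0 = ((a ++ b).count v : Int)) :
    pairScan a b (blocks (fun v => (a ++ b).count v) vals)
      = bScan (PySem.Set.ofList a) (PySem.Set.ofList b) counts none vals := by
  induction vals with
  | nil => rfl
  | cons v vs ih =>
    have hv : v ∈ a ++ b := hmem v (List.mem_cons_self)
    have hcv : counts.getD v 0 = ((a ++ b).count v : Int) := hcnt v (List.mem_cons_self)
    have hk : 1 ≤ (a ++ b).count v := List.count_pos_iff.2 hv
    have hboth : ((PySem.Set.ofList a).contains v && (PySem.Set.ofList b).contains v)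
        = (if (a.contains v && b.contains v || b.contains v && a.contains v) = true
           then true else false) := by
      simp only [set_contains_eq]
      cases ha : a.contains v <;> cases hb : b.contains v <;> simp
    by_cases h2 : 2 ≤ (a ++ b).count v
    · -- duplicated value: both scans stop here with "v in both groups"
      obtain ⟨k, hk2⟩ : ∃ k, (a ++ b).count v = k + 1 + 1 := ⟨(a ++ b).count v - 2, by omega⟩
      rw [blocks_cons, hk2, List.replicate_succ, List.replicate_succ,
        List.cons_append, List.cons_append, pairScan, bScan, hcv,
        if_pos (show 2 ≤ ((a ++ b).count v : Int) by exact_mod_cast h2),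
        if_pos (show (a.contains v && a.contains v || b.contains v && b.contains v) = true by
          rcases List.mem_append.1 hv with h | h <;> simp [h]),
        hboth]
    · -- count v = 1: single copy, cross-check against the next distinct value
      have hk1 : (a ++ b).count v = 1 := by omega
      rw [blocks_cons, hk1, List.replicate_one, List.singleton_append, bScan, hcv,
        if_neg (show ¬ (2 : Int) ≤ ((a ++ b).count v : Int) by exact_mod_cast h2)]
      have ih' := ih (fun w hw => hmem w (List.mem_cons_of_mem _ hw))
        (fun w hw => hcnt w (List.mem_cons_of_mem _ hw))
      cases vs with
      | nil => rfl
      | cons w vs' =>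
        have hw : w ∈ a ++ b := hmem w (List.mem_cons_of_mem _ List.mem_cons_self)
        have hkw : 1 ≤ (a ++ b).count w := List.count_pos_iff.2 hw
        obtain ⟨kw, hkw2⟩ : ∃ kw, (a ++ b).count w = kw + 1 :=
          ⟨(a ++ b).count w - 1, by omega⟩
        have hblk2 : blocks (fun v => (a ++ b).count v) (w :: vs')
            = w :: (List.replicate kw w ++ blocks (fun v => (a ++ b).count v) vs') := by
          rw [blocks_cons, hkw2, List.replicate_succ, List.cons_append]
        have hcondeq : ((PySem.Set.ofList a).contains v && (PySem.Set.ofList a).contains w ||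
            (PySem.Set.ofList b).contains v && (PySem.Set.ofList b).contains w)
            = (a.contains w && a.contains v || b.contains w && b.contains v) := by
          simp only [set_contains_eq]
          rw [Bool.and_comm (a.contains v) (a.contains w),
            Bool.and_comm (b.contains v) (b.contains w)]
        rw [hblk2, pairScan, bScan, hcondeq]
        by_cases hcross : (a.contains w && a.contains v || b.contains w && b.contains v) = true
        · rw [if_pos hcross, if_pos hcross]
          simp only [set_contains_eq]
          cases h : (a.contains w && b.contains v || b.contains w && a.contains v) <;> simp
        · rw [if_neg hcross, if_neg hcross, ← hblk2, ih', bScan]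

theorem arrangeStudents_eq (a b : List Int) :
    arrangeStudents a b = arrangeStudents_alt a b := by
  unfold arrangeStudents arrangeStudents_alt
  simp only
  set C := b.foldl (fun d x => d.insert x (d.getD x 0 + 1))
      (a.foldl (fun d x => d.insert x (d.getD x 0 + 1)) (PySem.Dict.empty : PySem.Dict Int Int)) with hC
  have hgetD : ∀ v, C.getD v 0 = ((a ++ b).count v : Int) := by
    intro v
    rw [hC, PySem.Dict.getD_foldl_insert_add_one, PySem.Dict.getD_foldl_insert_add_one,
      PySem.Dict.getD_empty, List.count_append]
    push_cast; ring
  have hkeys : C.keys = PySem.Set.update (PySem.Set.ofList a) b := by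
    rw [hC, PySem.Dict.keys_foldl_insert, PySem.Dict.keys_foldl_insert,
      PySem.Dict.keys_empty, PySem.Set.update_nil_left]
  have hknd : C.keys.Nodup := by
    rw [hkeys]; exact PySem.Set.nodup_update _ _ (PySem.Set.nodup_ofList a)
  have hkmem : ∀ v, v ∈ C.keys ↔ v ∈ a ++ b := by
    intro v
    rw [hkeys, PySem.Set.mem_update, PySem.Set.mem_ofList, List.mem_append]
  set vals := PySem.List.sorted C.keys (fun x => x) false with hvals
  have hperm : vals.Perm C.keys := PySem.List.sorted_perm C.keys (fun x => x) false
  have hvnd : vals.Nodup := hperm.nodup_iff.2 hknd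
  have hvmem : ∀ v, v ∈ vals ↔ v ∈ a ++ b := fun v =>
    Iff.trans (hperm.mem_iff) (hkmem v)
  have hvpair : vals.Pairwise (· ≤ ·) := PySem.List.sorted_pairwise C.keys (fun x => x)
  have hsorted : PySem.List.sorted (a ++ b) (fun x => x) false
      = blocks (fun v => (a ++ b).count v) vals := by
    apply PySem.List.sorted_id_eq_of_perm_of_pairwise
    · exact blocks_perm a b vals hvnd hvmem
    · exact blocks_pairwise _ vals hvpair
  rw [hsorted]
  rw [show (1 : Nat) = 0 + 1 from rfl, isValidGo_eq_pairScan, List.drop_zero]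
  exact pairScan_blocks a b C vals (fun v hv => (hvmem v).1 hv) (fun v _ => hgetD v)

-- ===== VERDICT (by name: the statement is the Claim_ definition above) =====
theorem arrangeStudents_spec : Claim_equal_arrangeStudents := by
  intro a b _
  exact arrangeStudents_eq a b
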